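-- pv_equiv track=rewrite | github.com/lucian-pdev/Python-course-progression-and-practice-by-lucian-pdev | NetAcad Python/Python Essentials 1/intro: bitwise operations.py | line_maker
-- ===== SOURCE A (Python) =====
-- def is_bit_set(x,pos):
--     return (x & (1 << pos)) != 0
--
-- def line_maker(x):
--     printing_space = ""
--     for space in range(0,7):
--         if is_bit_set(x,space) == True:
--             printing_space += "x"
--         else:
--             printing_space += "_"
--     return printing_space
-- ===== SOURCE B (Python) =====
-- def line_maker(x):
--     bits = format(x & 0x7F, '07b')
--     return bits.translate(str.maketrans('01', '_x'))[::-1]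
-- ===== Notes on version B (the rewrite author's own statement) =====
-- stated objective: idiomatic
-- what changed: B masks the low 7 bits once and formats them as a binary string (format(x & 0x7F, '07b')), translating '0'/'1' to '_'/'x' and reversing, instead of A's per-bit loop of shift-and-test with string concatenation.
import Mathlib
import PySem

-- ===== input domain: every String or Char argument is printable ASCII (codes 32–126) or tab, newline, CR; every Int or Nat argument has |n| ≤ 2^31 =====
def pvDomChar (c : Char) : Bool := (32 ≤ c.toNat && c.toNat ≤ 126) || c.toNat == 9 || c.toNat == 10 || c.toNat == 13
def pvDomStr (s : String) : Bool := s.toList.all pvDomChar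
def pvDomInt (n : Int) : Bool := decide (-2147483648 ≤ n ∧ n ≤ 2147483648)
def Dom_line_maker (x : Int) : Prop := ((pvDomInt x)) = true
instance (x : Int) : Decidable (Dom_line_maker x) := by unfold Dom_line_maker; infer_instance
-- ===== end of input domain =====

-- B masks the low 7 bits once and renders them as a translated, reversed binary string instead of A's per-bit shift-and-test loop (idiomatic; no speed claim).

-- ===== PORT A =====
-- pos is only ever 0..6 here (from range(0,7)), so Python's '1 << pos' is '1 <<< pos.toNat'
def is_bit_set (x : Int) (pos : Int) : Bool :=
  PySem.Int.band x ((1 : Int) <<< pos.toNat) != 0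

def line_maker (x : Int) : String :=
  String.mk ((PySem.List.pyRange 0 7 1).foldl
    (fun acc space => if is_bit_set x space = true then acc ++ ['x'] else acc ++ ['_']) [])

-- ===== PORT B =====
-- bin7 m = format(m, '07b') for m < 128: seven binary digits, most significant first
def bin7 (m : Nat) : List Char :=
  (List.range 7).map (fun i => if m.testBit (6 - i) then '1' else '0')

def line_maker_alt (x : Int) : String :=
  String.mk (((bin7 (PySem.Int.band x 127).toNat).map
    (fun c => if c = '1' then 'x' else '_')).reverse)

-- ===== PRECONDITION & SPEC =====
def Spec_line_maker (x : Int) (out : String) : Prop := out = line_maker_alt x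
instance (x : Int) (out : String) : Decidable (Spec_line_maker x out) := by unfold Spec_line_maker; infer_instance

-- ===== CLAIM (what is proved, stated in full; the proofs are below) =====
def Claim_equal_line_maker : Prop := ∀ (x : Int), Dom_line_maker x → Spec_line_maker x (line_maker x)

-- ===== LEMMAS AND PROOFS =====

-- subtracting from the all-ones 7-bit mask flips each low bit
theorem flip127 : ∀ s, s ≤ 127 → ∀ pos, pos < 7 → (127 - s).testBit pos = !(s.testBit pos) := by decide

theorem ones127 : ∀ pos, pos < 7 → (127 : Nat).testBit pos = true := by decide

theorem shift_pow (pos : Nat) : ((1 : Int) <<< pos) = ((2 ^ pos : Nat) : Int) := by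
  rw [Int.shiftLeft_eq]; push_cast; ring

theorem toNat_two_pow (pos : Nat) : ((2 : Int) ^ pos).toNat = 2 ^ pos := by
  rw [show ((2 : Int) ^ pos) = ((2 ^ pos : Nat) : Int) by push_cast; ring]
  exact Int.toNat_natCast _

-- A's per-position bit test equals the corresponding bit of B's 7-bit mask
theorem keyB (x : Int) (pos : Nat) (hp : pos < 7) :
    (PySem.Int.band x ((1 : Int) <<< pos) != 0) = (PySem.Int.band x 127).toNat.testBit pos := by
  rw [shift_pow]
  cases x with
  | ofNat m =>
      rw [show ((Int.ofNat m) = ((m : Nat) : Int)) from rfl,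
          show ((127 : Int) = ((127 : Nat) : Int)) from rfl,
          PySem.Int.band_natCast, PySem.Int.band_natCast]
      simp only [Int.toNat_natCast, Nat.testBit_land]
      rw [ones127 pos hp, Nat.and_two_pow]
      cases h : m.testBit pos <;> simp [h]
  | negSucc k =>
      have hneg : (-(Int.negSucc k) - 1).toNat = k := by simp [Int.negSucc_eq]
      have hb1 : PySem.Int.band (Int.negSucc k) ((2 ^ pos : Nat) : Int)
          = ((2 ^ pos - (2 ^ pos &&& k) : Nat) : Int) := by
        simp [PySem.Int.band, hneg, toNat_two_pow]
      have hb2 : PySem.Int.band (Int.negSucc k) 127 = ((127 - (127 &&& k) : Nat) : Int) := by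
        simp [PySem.Int.band, hneg]
      rw [hb1, hb2]
      simp only [Int.toNat_natCast]
      rw [flip127 (127 &&& k) Nat.and_le_left pos hp]
      simp only [Nat.testBit_land, ones127 pos hp, Bool.true_and]
      rw [Nat.land_comm, Nat.and_two_pow]
      cases h : k.testBit pos <;> simp [h, Nat.sub_eq_zero_iff_le]

-- '1'/'0' digits translated to 'x'/'_' collapse to a single conditional
theorem tr_digit (b : Bool) :
    (if (if b then '1' else '0') = '1' then 'x' else '_') = (if b then 'x' else '_') := by
  cases b <;> decide

theorem line_maker_spec : Claim_equal_line_maker := by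
  intro x _
  unfold Spec_line_maker line_maker line_maker_alt is_bit_set bin7
  rw [show PySem.List.pyRange 0 7 1 = [0, 1, 2, 3, 4, 5, 6] from by decide,
      show List.range 7 = [0, 1, 2, 3, 4, 5, 6] from rfl]
  simp only [List.foldl_cons, List.foldl_nil, List.map_cons, List.map_nil, List.reverse_cons,
    List.reverse_nil, List.nil_append, List.cons_append, tr_digit,
    show Int.toNat 0 = 0 from rfl, show Int.toNat 1 = 1 from rfl, show Int.toNat 2 = 2 from rfl,
    show Int.toNat 3 = 3 from rfl, show Int.toNat 4 = 4 from rfl, show Int.toNat 5 = 5 from rfl,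
    show Int.toNat 6 = 6 from rfl,
    show (6 - 0 : Nat) = 6 from rfl, show (6 - 1 : Nat) = 5 from rfl, show (6 - 2 : Nat) = 4 from rfl,
    show (6 - 3 : Nat) = 3 from rfl, show (6 - 4 : Nat) = 2 from rfl, show (6 - 5 : Nat) = 1 from rfl,
    show (6 - 6 : Nat) = 0 from rfl]
  rw [keyB x 0 (by omega), keyB x 1 (by omega), keyB x 2 (by omega), keyB x 3 (by omega),
      keyB x 4 (by omega), keyB x 5 (by omega), keyB x 6 (by omega)]
  generalize (PySem.Int.band x 127).toNat = m
  cases h0 : m.testBit 0 <;> cases h1 : m.testBit 1 <;> cases h2 : m.testBit 2 <;>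
    cases h3 : m.testBit 3 <;> cases h4 : m.testBit 4 <;> cases h5 : m.testBit 5 <;>
    cases h6 : m.testBit 6 <;> simp [h0, h1, h2, h3, h4, h5, h6]
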